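-- pv_equiv track=rewrite | github.com/iontorrent/TS | pipeline/python/ion/reports/alignment_to_ionogram.py | get_align_num
-- ===== SOURCE A (Python) =====
-- def get_align_num(countLen):
--     loc_string = []
--     modulo = 10
--     for n in range(int(countLen)):
--         if n%modulo == 0 and n != 0:
--             num = str(n)
--             if len(num)>1:
--                 for i in range(len(num)-1):
--                     loc_string.pop()
--             loc_string.append(str(n))
--         else:
--             loc_string.append("&nbsp;")
--     return loc_string
-- ===== SOURCE B (Python) =====
-- def get_align_num(countLen):
--     # Decade-at-a-time construction: seed the first (up to) 10 blanks, then for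
--     # each multiple of 10 trim len(str(m))-1 trailing tokens, write the number,
--     # and bulk-append the blanks for the rest of the decade.
--     total = int(countLen)
--     out = ["&nbsp;"] * min(10, max(total, 0))
--     m = 10
--     while m < total:
--         trim = len(str(m)) - 1
--         del out[max(len(out) - trim, 0):]
--         out.append(str(m))
--         out.extend(["&nbsp;"] * (min(m + 10, total) - m - 1))
--         m += 10
--     return out
-- ===== Notes on version B (the rewrite author's own statement) =====
-- stated objective: alternative
-- what changed: B builds the ruler a decade at a time (seed 10 blanks, then per multiple of 10 trim the tail by slicing, append the number, and bulk-extend the remaining blanks) instead of A's per-position loop with an inner pop loop at every number.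
import Mathlib
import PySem

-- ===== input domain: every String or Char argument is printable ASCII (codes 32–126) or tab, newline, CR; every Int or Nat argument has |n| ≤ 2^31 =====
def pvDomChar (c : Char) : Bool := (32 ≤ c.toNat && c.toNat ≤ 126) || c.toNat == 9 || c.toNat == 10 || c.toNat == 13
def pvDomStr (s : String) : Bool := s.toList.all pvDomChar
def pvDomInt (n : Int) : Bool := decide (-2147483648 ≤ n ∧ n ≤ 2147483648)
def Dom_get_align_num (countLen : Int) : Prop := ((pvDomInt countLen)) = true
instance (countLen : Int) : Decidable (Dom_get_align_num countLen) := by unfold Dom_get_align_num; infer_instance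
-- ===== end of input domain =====

-- B builds the ruler a decade at a time (seed blanks, trim-by-slice, bulk blank extend)
-- instead of A's per-position loop with an inner pop loop; equivalence proved for all inputs.


-- ===== PORT A =====
-- one iteration of A's 'for n in range(int(countLen))' body
def pvAStep (loc_string : List String) (n : Int) : List String :=
  if PySem.Int.mod n 10 = 0 ∧ n ≠ 0 then
    (if (PySem.Int.toStr n).length > 1 then
      -- 'for i in range(len(num)-1): loc_string.pop()'  (pop of the last element)
      (PySem.List.pyRange 0 (((PySem.Int.toStr n).length : Int) - 1) 1).foldl
        (fun l _ => l.dropLast) loc_string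
     else loc_string) ++ [PySem.Int.toStr n]
  else loc_string ++ ["&nbsp;"]

def get_align_num (countLen : Int) : List String :=
  (PySem.List.pyRange 0 countLen 1).foldl pvAStep []

-- ===== PORT B =====
-- B's while loop: 'while m < total: trim; slice; append str(m); extend blanks; m += 10'
def pvBLoop (total : Int) (m : Int) (out : List String) : List String :=
  if h : m < total then
    let trim := (PySem.Int.toStr m).length - 1
    let out := out.take (out.length - trim)  -- 'del out[max(len(out)-trim,0):]' (Nat sub clamps like the max)
    let out := out ++ [PySem.Int.toStr m]
    let out := out ++ List.replicate (min (m + 10) total - m - 1).toNat "&nbsp;"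
    pvBLoop total (m + 10) out
  else out
termination_by (total - m).toNat
decreasing_by omega

def get_align_num_alt (countLen : Int) : List String :=
  pvBLoop countLen 10 (List.replicate (min 10 (max countLen 0)).toNat "&nbsp;")

-- ===== PRECONDITION & SPEC =====
def Spec_get_align_num (countLen : Int) (out : List String) : Prop := out = get_align_num_alt countLen
instance (countLen : Int) (out : List String) : Decidable (Spec_get_align_num countLen out) := by unfold Spec_get_align_num; infer_instance

-- ===== CLAIM (what is proved, stated in full; the proofs are below) =====
def Claim_equal_get_align_num : Prop := ∀ (countLen : Int), Dom_get_align_num countLen → Spec_get_align_num countLen (get_align_num countLen)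

-- ===== LEMMAS AND PROOFS =====

-- folding 'pop' (dropLast) over any list of r.length items = keeping the first (length - r.length)
theorem pv_popfold {α β : Type} (r : List β) (xs : List α) :
    r.foldl (fun l _ => l.dropLast) xs = xs.take (xs.length - r.length) := by
  induction r generalizing xs with
  | nil => simp
  | cons a r ih =>
      rw [List.foldl_cons, ih, List.dropLast_eq_take, List.take_take]
      simp only [List.length_take, List.length_cons]
      congr 1
      omega

-- a stretch of positions that are not a positive multiple of 10 just appends blanks
theorem pv_blanks (k : Nat) : ∀ (a : Int) (out : List String),
    (∀ n : Int, a ≤ n → n < a + k → (PySem.Int.mod n 10 = 0 → n = 0)) →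
    (PySem.List.pyRange a (a + k) 1).foldl pvAStep out
      = out ++ List.replicate k "&nbsp;" := by
  induction k with
  | zero => intro a out _; simp [PySem.List.pyRange_one_eq_nil]
  | succ k ih =>
      intro a out h
      rw [PySem.List.pyRange_one_cons (by omega)]
      have ha : a + 1 + (k : Int) = a + (k + 1 : Nat) := by push_cast; ring
      have hstep : pvAStep out a = out ++ ["&nbsp;"] := by
        unfold pvAStep
        by_cases hz : PySem.Int.mod a 10 = 0 ∧ a ≠ 0
        · exact absurd (h a le_rfl (by push_cast; omega) hz.1) hz.2
        · rw [if_neg hz]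
      rw [List.foldl_cons, hstep, ← ha, ih (a + 1) (out ++ ["&nbsp;"])
        (fun n h1 h2 => h n (by omega) (by push_cast at h2 ⊢; omega))]
      simp [List.replicate_succ]

-- Python '% 10' agrees with Lean's emod (positive divisor)
theorem pv_mod10 (n : Int) : PySem.Int.mod n 10 = n % 10 :=
  PySem.Int.mod_eq_emod_of_pos (by norm_num)

-- the decade loop: starting at any positive multiple of 10, A's remaining fold equals B's loop
theorem pv_decade (total m : Int) (out : List String) (hm : 10 ≤ m) (hmod : m % 10 = 0) :
    (PySem.List.pyRange m total 1).foldl pvAStep out = pvBLoop total m out := by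
  rw [pvBLoop]
  split
  case isFalse h => rw [PySem.List.pyRange_one_eq_nil (by omega)]; rfl
  case isTrue h =>
    -- split range m total at e := min (m+10) total, then again: m, then blanks, then rest
    set e : Int := min (m + 10) total with he
    have h1 : m + 1 ≤ e := by omega
    have h2 : e ≤ total := by omega
    rw [PySem.List.pyRange_one_cons (by omega),
        PySem.List.pyRange_one_append (m + 1) e total h1 h2,
        List.foldl_cons, List.foldl_append]
    have hstepA : pvAStep out m = out.take (out.length - ((PySem.Int.toStr m).length - 1))
        ++ [PySem.Int.toStr m] := by
      unfold pvAStep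
      have hc : PySem.Int.mod m 10 = 0 ∧ m ≠ 0 := by
        constructor
        · exact by rw [pv_mod10]; exact hmod
        · omega
      rw [if_pos hc]
      split
      case isTrue hlen =>
        rw [pv_popfold]
        congr 2
        rw [PySem.List.length_pyRange_one]
        omega
      case isFalse hlen =>
        congr 1
        have : (PySem.Int.toStr m).length - 1 = 0 := by omega
        rw [this]
        simp
    have hblanks : (PySem.List.pyRange (m + 1) e 1).foldl pvAStep (pvAStep out m)
        = pvAStep out m ++ List.replicate (e - m - 1).toNat "&nbsp;" := by
      have hcast : m + 1 + ((e - m - 1).toNat : Int) = e := by omega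
      have hb := pv_blanks (e - m - 1).toNat (m + 1) (pvAStep out m)
        (fun n hn1 hn2 hn3 => by
          exfalso
          rw [pv_mod10] at hn3
          omega)
      rw [hcast] at hb
      exact hb
    have hrest : PySem.List.pyRange e total 1 = PySem.List.pyRange (m + 10) total 1 := by
      by_cases hc : m + 10 ≤ total
      · have : e = m + 10 := by omega
        rw [this]
      · rw [PySem.List.pyRange_one_eq_nil (by omega),
            PySem.List.pyRange_one_eq_nil (by omega)]
    rw [hblanks, hstepA, hrest,
        pv_decade total (m + 10) _ (by omega) (by omega)]
termination_by (total - m).toNat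
decreasing_by omega

theorem get_align_num_eq (countLen : Int) :
    get_align_num countLen = get_align_num_alt countLen := by
  unfold get_align_num get_align_num_alt
  by_cases h : countLen ≤ 10
  · -- no full decade: A's whole range is blanks (only n = 0 has mod 10 = 0)
    rw [pvBLoop]
    rw [dif_neg (by omega)]
    by_cases h0 : 0 ≤ countLen
    · have hc : (0 : Int) + ((countLen).toNat : Int) = countLen := by omega
      rw [← hc, pv_blanks countLen.toNat 0 []
        (fun n h1 h2 h3 => by rw [pv_mod10] at h3; omega)]
      simp only [List.nil_append]
      congr 1
      omega
    · rw [PySem.List.pyRange_one_eq_nil (by omega)]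
      simp only [List.foldl_nil]
      have : (min 10 (max countLen 0)).toNat = 0 := by omega
      rw [this]; rfl
  · -- split range(0, countLen) at 10
    rw [PySem.List.pyRange_one_append 0 10 countLen (by omega) (by omega),
        List.foldl_append]
    have hfirst : (PySem.List.pyRange 0 10 1).foldl pvAStep []
        = List.replicate 10 "&nbsp;" := by
      have : (PySem.List.pyRange 0 10 1).foldl pvAStep []
          = [] ++ List.replicate 10 "&nbsp;" := by
        have : (0 : Int) + ((10 : Nat) : Int) = 10 := by norm_num
        rw [← this]
        exact pv_blanks 10 0 []
          (fun n h1 h2 h3 => by rw [pv_mod10] at h3; omega)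
      simpa using this
    rw [hfirst, pv_decade countLen 10 _ (by norm_num) (by norm_num)]
    have : (min 10 (max countLen 0)).toNat = 10 := by omega
    rw [this]

-- ===== VERDICT (by name: the statement is the Claim_ definition above) =====
theorem get_align_num_spec : Claim_equal_get_align_num := by
  intro countLen _
  unfold Spec_get_align_num
  exact get_align_num_eq countLen
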